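-- pv_equiv track=rewrite | github.com/voltage-poppy/SkillWard | skill-scanner/skill_scanner/core/analyzers/pipeline_analyzer.py | _resembles_api_call
-- ===== SOURCE A (Python) =====
-- def _resembles_api_call(line: str) -> bool:
--     """Heuristic: does this curl/wget invocation look like an API request?"""
--     low = line.lower()
--     api_markers = (
--         "-x ",
--         "--request",
--         " -d ",
--         "--data",
--         "--json",
--         " -h ",
--         "--header",
--         "/api/",
--         "-f ",
--         "--form ",
--     )
--     return any(m in low for m in api_markers)
-- ===== SOURCE B (Python) =====
-- _DISPATCH = {
--     "-": ("-x ", "--request", "--data", "--json", "--header", "-f ", "--form "),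
--     " ": (" -d ", " -h "),
--     "/": ("/api/",),
-- }
--
--
-- def _resembles_api_call(line: str) -> bool:
--     """Heuristic: does this curl/wget invocation look like an API request?"""
--     low = line.lower()
--     for i, ch in enumerate(low):
--         for m in _DISPATCH.get(ch, ()):
--             if low.startswith(m, i):
--                 return True
--     return False
-- ===== Notes on version B (the rewrite author's own statement) =====
-- stated objective: alternative
-- what changed: B replaces the ten whole-line substring scans with one left-to-right pass over the lowercased line that, at each position, consults a first-character dispatch table (dict from first character to the markers starting with it) and tests only those markers at that position.
import Mathlib
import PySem

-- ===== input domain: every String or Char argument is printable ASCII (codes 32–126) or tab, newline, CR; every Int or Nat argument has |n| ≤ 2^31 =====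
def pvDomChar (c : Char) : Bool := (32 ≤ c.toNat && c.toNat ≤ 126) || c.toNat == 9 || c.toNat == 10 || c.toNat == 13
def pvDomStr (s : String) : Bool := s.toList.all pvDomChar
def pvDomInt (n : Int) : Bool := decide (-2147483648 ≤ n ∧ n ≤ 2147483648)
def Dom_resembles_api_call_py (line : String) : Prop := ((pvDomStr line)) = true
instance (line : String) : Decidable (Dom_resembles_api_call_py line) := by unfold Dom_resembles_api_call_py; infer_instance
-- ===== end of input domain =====

-- B replaces the ten whole-line substring scans with ONE left-to-right pass that,
-- at each position, consults a first-character dispatch table (a dict from the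
-- marker's first character to the markers starting with it) and tests only those
-- few markers at that position; same return value everywhere.

-- ===== PORT A =====
-- the ten literal markers (the module's tuple)
def pvMarkers : List String :=
  ["-x ", "--request", " -d ", "--data", "--json",
   " -h ", "--header", "/api/", "-f ", "--form "]

def resembles_api_call_py (line : String) : Bool :=
  let low := PySem.Str.lower line
  pvMarkers.any (fun m => PySem.Str.isIn m low)

-- ===== PORT B =====
-- Source B's _DISPATCH dict literal: first character ↦ the markers starting with it
def pvDispatch : PySem.Dict Char (List (List Char)) :=
  PySem.Dict.mk
    [('-', [['-','x',' '], ['-','-','r','e','q','u','e','s','t'],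
            ['-','-','d','a','t','a'], ['-','-','j','s','o','n'],
            ['-','-','h','e','a','d','e','r'], ['-','f',' '],
            ['-','-','f','o','r','m',' ']]),
     (' ', [[' ','-','d',' '], [' ','-','h',' ']]),
     ('/', [['/','a','p','i','/']])]

-- the single pass: at position i (suffix c :: t), test only the markers the
-- dispatch table holds for c (low.startswith(m, i) = startswith of the suffix)
def pvScanB (cs : List Char) : Bool :=
  match cs with
  | [] => false
  | c :: t => (pvDispatch.getD c []).any (fun m => PySem.Chars.startswith (c :: t) m) || pvScanB t

def resembles_api_call_py_alt (line : String) : Bool :=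
  pvScanB (PySem.Str.lower line).toList

-- ===== PRECONDITION & SPEC =====
def Spec_resembles_api_call_py (line : String) (out : Bool) : Prop := out = resembles_api_call_py_alt line
instance (line : String) (out : Bool) : Decidable (Spec_resembles_api_call_py line out) := by unfold Spec_resembles_api_call_py; infer_instance

-- ===== CLAIM =====
def Claim_equal_resembles_api_call_py : Prop := ∀ (line : String), Dom_resembles_api_call_py line → Spec_resembles_api_call_py line (resembles_api_call_py line)

-- ===== LEMMAS AND PROOFS =====

-- the markers' character lists
def pvMarkersChars : List (List Char) := pvMarkers.map String.toList

theorem pvMarkersChars_eq : pvMarkersChars =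
    [['-','x',' '], ['-','-','r','e','q','u','e','s','t'], [' ','-','d',' '],
     ['-','-','d','a','t','a'], ['-','-','j','s','o','n'], [' ','-','h',' '],
     ['-','-','h','e','a','d','e','r'], ['/','a','p','i','/'], ['-','f',' '],
     ['-','-','f','o','r','m',' ']] := by decide

-- a marker starting with a different character never matches at this position
theorem pvSw_ne {c d : Char} (h : c ≠ d) (t m : List Char) :
    PySem.Chars.startswith (c :: t) (d :: m) = false := by
  rw [← Bool.not_eq_true, PySem.Chars.startswith_iff, List.cons_prefix_cons]
  rintro ⟨rfl, -⟩; exact h rfl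

-- at a given position, the dispatch group for the head character finds a match
-- iff scanning ALL markers there would: markers outside the group start with a
-- different character and can never be a prefix of this suffix
theorem pvGroup_any (c : Char) (t : List Char) :
    (pvDispatch.getD c []).any (fun m => PySem.Chars.startswith (c :: t) m)
      = pvMarkersChars.any (fun m => PySem.Chars.startswith (c :: t) m) := by
  rw [pvMarkersChars_eq]
  by_cases h1 : c = '-'
  · subst h1
    have hs : ∀ m, PySem.Chars.startswith ('-' :: t) (' ' :: m) = false :=
      pvSw_ne (by decide) t
    have hs' : ∀ m, PySem.Chars.startswith ('-' :: t) ('/' :: m) = false :=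
      pvSw_ne (by decide) t
    have hg : pvDispatch.getD '-' [] =
        [['-','x',' '], ['-','-','r','e','q','u','e','s','t'],
         ['-','-','d','a','t','a'], ['-','-','j','s','o','n'],
         ['-','-','h','e','a','d','e','r'], ['-','f',' '],
         ['-','-','f','o','r','m',' ']] := by decide
    rw [hg]
    simp only [List.any_cons, List.any_nil, hs, hs', Bool.false_or, Bool.or_false]
  · by_cases h2 : c = ' '
    · subst h2
      have hs : ∀ m, PySem.Chars.startswith (' ' :: t) ('-' :: m) = false :=
        pvSw_ne (by decide) t
      have hs' : ∀ m, PySem.Chars.startswith (' ' :: t) ('/' :: m) = false :=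
        pvSw_ne (by decide) t
      have hg : pvDispatch.getD ' ' [] = [[' ','-','d',' '], [' ','-','h',' ']] := by decide
      rw [hg]
      simp only [List.any_cons, List.any_nil, hs, hs', Bool.false_or, Bool.or_false]
    · by_cases h3 : c = '/'
      · subst h3
        have hs : ∀ m, PySem.Chars.startswith ('/' :: t) ('-' :: m) = false :=
          pvSw_ne (by decide) t
        have hs' : ∀ m, PySem.Chars.startswith ('/' :: t) (' ' :: m) = false :=
          pvSw_ne (by decide) t
        have hg : pvDispatch.getD '/' [] = [['/','a','p','i','/']] := by decide
        rw [hg]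
        simp only [List.any_cons, List.any_nil, hs, hs', Bool.false_or, Bool.or_false]
      · have hs1 : ∀ m, PySem.Chars.startswith (c :: t) ('-' :: m) = false :=
          pvSw_ne h1 t
        have hs2 : ∀ m, PySem.Chars.startswith (c :: t) (' ' :: m) = false :=
          pvSw_ne h2 t
        have hs3 : ∀ m, PySem.Chars.startswith (c :: t) ('/' :: m) = false :=
          pvSw_ne h3 t
        have hg : pvDispatch.getD c [] = [] := by
          rw [PySem.Dict.getD_eq_get?_getD]
          have hb1 : ('-' == c) = false := beq_eq_false_iff_ne.mpr (Ne.symm h1)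
          have hb2 : (' ' == c) = false := beq_eq_false_iff_ne.mpr (Ne.symm h2)
          have hb3 : ('/' == c) = false := beq_eq_false_iff_ne.mpr (Ne.symm h3)
          simp [pvDispatch, hb1, hb2, hb3, PySem.Dict.get?]
        rw [hg]
        simp only [List.any_cons, List.any_nil, hs1, hs2, hs3, Bool.or_false]

-- the pass finds a match iff some marker is a prefix of some suffix
theorem pvScanB_iff (cs : List Char) :
    pvScanB cs = true ↔ ∃ m ∈ pvMarkersChars, ∃ j, m <+: cs.drop j := by
  induction cs with
  | nil =>
      simp only [pvScanB, Bool.false_eq_true, false_iff]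
      rintro ⟨m, hm, j, hp⟩
      rw [List.drop_nil] at hp
      have : m = [] := List.prefix_nil.mp hp
      subst this
      revert hm; decide
  | cons c t ih =>
      rw [pvScanB, pvGroup_any, Bool.or_eq_true, ih, List.any_eq_true]
      simp only [PySem.Chars.startswith_iff]
      constructor
      · rintro (⟨m, hm, hp⟩ | ⟨m, hm, j, hp⟩)
        · exact ⟨m, hm, 0, by simpa using hp⟩
        · exact ⟨m, hm, j + 1, by simpa using hp⟩
      · rintro ⟨m, hm, j, hp⟩
        cases j with
        | zero => exact Or.inl ⟨m, hm, by simpa using hp⟩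
        | succ k => exact Or.inr ⟨m, hm, k, by simpa using hp⟩

-- ===== VERDICT =====
theorem resembles_api_call_py_spec : Claim_equal_resembles_api_call_py := by
  intro line _
  show resembles_api_call_py line = resembles_api_call_py_alt line
  rw [Bool.eq_iff_iff]
  unfold resembles_api_call_py resembles_api_call_py_alt
  rw [pvScanB_iff, List.any_eq_true]
  simp only [PySem.Str.isIn_eq, pvMarkersChars, List.mem_map,
    PySem.Chars.exists_prefix_drop_iff_isIn]
  constructor
  · rintro ⟨m, hm, h⟩; exact ⟨m.toList, ⟨m, hm, rfl⟩, h⟩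
  · rintro ⟨_, ⟨m, hm, rfl⟩, h⟩; exact ⟨m, hm, h⟩
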